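-- pv_equiv track=rewrite | github.com/Nahom-Derese/Competitive-Programing | Archive/Turing Questions/Mure2.py | solution
-- ===== SOURCE A (Python) =====
-- def solution(r):
--     ans = []
--     for i in r:
--         if r.count(i) == i:
--             ans.append(i)
--
--     if len(ans) == 0:
--         return -1
--     else:
--         return(max(ans))
-- ===== SOURCE B (Python) =====
-- def solution(r):
--     def scan(s):
--         # s is sorted in non-increasing order; examine its first run of equal values
--         if not s:
--             return -1
--         x = s[0]
--         j = 1
--         while j < len(s) and s[j] == x:
--             j += 1
--         if j == x:
--             return x
--         return scan(s[j:])
--     return scan(sorted(r, reverse=True))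
-- ===== Notes on version B (the rewrite author's own statement) =====
-- stated objective: faster
-- what changed: Sorts the list in descending order once and scans it run by run, returning the first value whose run length equals the value (the descending order makes the first hit the maximum), instead of calling r.count(i) for every element and taking the max of a collected list.
import Mathlib
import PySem

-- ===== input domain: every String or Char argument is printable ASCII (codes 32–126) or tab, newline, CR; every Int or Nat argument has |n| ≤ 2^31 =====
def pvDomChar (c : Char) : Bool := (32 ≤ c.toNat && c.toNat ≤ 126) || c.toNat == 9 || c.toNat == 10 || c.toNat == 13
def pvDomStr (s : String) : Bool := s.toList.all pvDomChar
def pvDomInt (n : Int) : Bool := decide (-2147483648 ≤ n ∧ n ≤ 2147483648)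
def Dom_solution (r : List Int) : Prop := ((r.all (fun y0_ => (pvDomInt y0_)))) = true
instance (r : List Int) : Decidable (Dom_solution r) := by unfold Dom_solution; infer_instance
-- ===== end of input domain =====

-- B sorts once (descending) and scans runs, taking the first value whose run length equals it, replacing A's per-element r.count rescan (faster).


-- ===== PORT A =====
def solution (r : List Int) : Int :=
  let ans := r.foldl (fun a i => if PySem.List.count r i = i then a ++ [i] else a) []
  if ans.length = 0 then -1
  else (PySem.List.max? ans (fun x => x)).getD 0  -- getD unreachable: ans is nonempty here

-- ===== PORT B =====
-- B's inner 'scan': look at the first run of equal values of a descending-sorted list;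
-- 'j' (the run length) is the takeWhile length + 1, 's[j:]' is the dropWhile remainder.
def solutionAltScan : List Int → Int
  | [] => -1
  | x :: t =>
      let j := (t.takeWhile (fun y => y == x)).length + 1
      if (j : Int) = x then x
      else solutionAltScan (t.dropWhile (fun y => y == x))
termination_by s => s.length
decreasing_by
  simp only [List.length_cons]
  exact Nat.lt_succ_of_le (List.length_dropWhile_le _ _)

def solution_alt (r : List Int) : Int :=
  solutionAltScan (PySem.List.sorted r (fun x => x) true)

-- ===== PRECONDITION & SPEC =====
def Spec_solution (r : List Int) (out : Int) : Prop := out = solution_alt r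
instance (r : List Int) (out : Int) : Decidable (Spec_solution r out) := by unfold Spec_solution; infer_instance

-- ===== CLAIM (what is proved, stated in full; the proofs are below) =====
def Claim_equal_solution : Prop := ∀ (r : List Int), Dom_solution r → Spec_solution r (solution r)

-- ===== LEMMAS AND PROOFS =====

-- Values passing the test occur in the list and hence their count is positive, so they are ≥ 1.
theorem qual_pos (l : List Int) (x : Int) (hx : x ∈ l) (h : (l.count x : Int) = x) : 1 ≤ x := by
  have h1 : 1 ≤ l.count x := List.count_pos_iff.mpr hx
  omega

-- A's accumulation loop is a filter.
theorem solution_eq_filter_max (r : List Int) :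
    solution r = (r.filter (fun v => decide ((r.count v : Int) = v))).foldl max (-1) := by
  unfold solution
  dsimp only
  have hA : (fun (a : List Int) (i : Int) => if (PySem.List.count r i = i) then a ++ [i] else a)
      = fun a i => if (fun j => decide ((List.count j r : Int) = j)) i = true then a ++ [id i] else a := by
    funext a i; simp [PySem.List.count_eq]
  rw [hA, PySem.List.foldl_append_if (fun j => decide ((List.count j r : Int) = j)) id r []]
  simp only [List.nil_append, List.map_id]
  cases hf : r.filter (fun v => decide ((List.count v r : Int) = v)) with
  | nil => simp
  | cons y t =>
      simp only [List.length_cons, if_neg (by omega : ¬ (t.length + 1 = 0))]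
      rw [PySem.List.max?_id_cons, Option.getD_some]
      have hy1 : (1:Int) ≤ y := by
        have hy : y ∈ r.filter (fun v => decide ((List.count v r : Int) = v)) := by
          rw [hf]; exact List.mem_cons_self
        rcases List.mem_filter.mp hy with ⟨hmem, hdec⟩
        exact qual_pos r y hmem (of_decide_eq_true hdec)
      simp only [List.foldl_cons]
      rw [max_eq_right (by omega : (-1:Int) ≤ y)]

-- B's scan, one descending-sorted list at a time (fuel = a length bound, for the induction).
theorem scan_eq_aux : ∀ (n : Nat) (s : List Int), s.length ≤ n → s.Pairwise (fun a b => b ≤ a) →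
    solutionAltScan s = (s.filter (fun v => decide ((s.count v : Int) = v))).foldl max (-1) := by
  intro n
  induction n with
  | zero =>
      intro s hlen _
      have hs0 : s = [] := List.eq_nil_of_length_eq_zero (Nat.le_zero.mp hlen)
      subst hs0; simp [solutionAltScan]
  | succ n ih =>
      intro s hlen hs
      match s, hlen, hs with
      | [], _, _ => simp [solutionAltScan]
      | x :: t, hlen, hs =>
        rcases List.pairwise_cons.mp hs with ⟨hxt, hpt⟩
        rw [solutionAltScan]
        set w := t.takeWhile (fun y => y == x) with hw
        set d := t.dropWhile (fun y => y == x) with hd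
        have htwd : w ++ d = t := List.takeWhile_append_dropWhile
        have hwx : ∀ v ∈ w, v = x := fun v hv => by simpa using List.mem_takeWhile_imp hv
        have hdlt : ∀ v ∈ d, v < x := by
          intro v hv
          rcases hcd : d with _ | ⟨h, d'⟩
          · rw [hcd] at hv; simp at hv
          · have hh : ((h == x) : Bool) = false := by
              have := List.head?_dropWhile_not (fun y => y == x) t
              rw [← hd, hcd] at this
              simp at this
              simpa using this
            have hhne : h ≠ x := by simpa using hh
            have hhle : h ≤ x := hxt h ((List.dropWhile_sublist _).subset (hcd ▸ List.mem_cons_self))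
            have hhlt : h < x := lt_of_le_of_ne hhle hhne
            have hpd : d.Pairwise (fun a b => b ≤ a) := hpt.sublist (List.dropWhile_sublist _)
            rw [hcd] at hpd hv
            rcases List.mem_cons.mp hv with rfl | hvd'
            · exact hhlt
            · exact lt_of_le_of_lt ((List.pairwise_cons.mp hpd).1 v hvd') hhlt
        have hcount_x : (x :: t).count x = w.length + 1 := by
          rw [List.count_cons_self, ← htwd, List.count_append,
              List.count_eq_length.mpr (by intro b hb; simpa using (hwx b hb).symm),
              List.count_eq_zero.mpr (fun hx => lt_irrefl x (hdlt x hx))]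
        have hcount_d : ∀ v ∈ d, (x :: t).count v = d.count v := by
          intro v hv
          have hne : v ≠ x := ne_of_lt (hdlt v hv)
          rw [← htwd]
          simp only [List.count_cons, List.count_append, beq_iff_eq,
            List.count_eq_zero.mpr (fun hvw => hne (hwx v hvw))]
          simp [Ne.symm hne]
        set Q : Int → Bool := fun v => decide (((x :: t).count v : Int) = v) with hQ
        split_ifs with hj
        · -- the first run already qualifies: x is the answer
          have hxq : Q x = true := by
            rw [hQ]; simp only [hcount_x]; exact decide_eq_true (by exact_mod_cast hj)
          have hxmem : x ∈ (x :: t).filter Q :=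
            List.mem_filter.mpr ⟨List.mem_cons_self, hxq⟩
          have hx1 : (1:Int) ≤ x := by push_cast at hj; omega
          apply le_antisymm
          · exact (PySem.List.le_foldl_max ((x :: t).filter Q) (-1)).2 _ hxmem
          · rcases PySem.List.foldl_max_mem ((x :: t).filter Q) (-1) with he | he
            · rw [he]; omega
            · rcases List.mem_filter.mp he with ⟨hm, _⟩
              rcases List.mem_cons.mp hm with h | h
              · omega
              · exact le_trans (hxt _ h) (le_refl x)
        · -- the first run fails the test; it contributes nothing to the filter
          have hdn : d.length ≤ n := by
            have ht1 : t.length ≤ n := by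
              simp only [List.length_cons] at hlen; omega
            exact le_trans (List.length_dropWhile_le _ _) ht1
          have hpd : d.Pairwise (fun a b => b ≤ a) := hpt.sublist (List.dropWhile_sublist _)
          rw [ih d hdn hpd]
          have hQx : Q x = false := by
            rw [hQ]; simp only [hcount_x]
            exact decide_eq_false (by exact_mod_cast hj)
          have hfeq : (x :: t).filter Q = d.filter (fun v => decide ((d.count v : Int) = v)) := by
            rw [List.filter_cons_of_neg (by simp [hQx]), ← htwd, List.filter_append,
                List.filter_eq_nil_iff.mpr (fun a ha => by simp [hwx a ha, hQx]),
                List.nil_append]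
            exact List.filter_congr (fun v hv => by rw [hQ]; simp only [hcount_d v hv])
          rw [hfeq]

-- B's scan on a descending-sorted list computes the max of the self-counting values.
theorem scan_eq (s : List Int) (hs : s.Pairwise (fun a b => b ≤ a)) :
    solutionAltScan s = (s.filter (fun v => decide ((s.count v : Int) = v))).foldl max (-1) :=
  scan_eq_aux s.length s (le_refl _) hs

-- A running max over two lists with the same members (above the seed) agrees.
theorem foldl_max_eq_of_mem_iff (l₁ l₂ : List Int) (a : Int)
    (h : ∀ x, x ∈ l₁ ↔ x ∈ l₂) :
    l₁.foldl max a = l₂.foldl max a := by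
  apply le_antisymm
  · rcases PySem.List.foldl_max_mem l₁ a with he | he
    · rw [he]; exact (PySem.List.le_foldl_max l₂ a).1
    · exact (PySem.List.le_foldl_max l₂ a).2 _ ((h _).mp he)
  · rcases PySem.List.foldl_max_mem l₂ a with he | he
    · rw [he]; exact (PySem.List.le_foldl_max l₁ a).1
    · exact (PySem.List.le_foldl_max l₁ a).2 _ ((h _).mpr he)

-- ===== VERDICT (by name: the statement is the Claim_ definition above) =====
theorem solution_spec : Claim_equal_solution := by
  intro r _
  unfold Spec_solution solution_alt
  have hperm : (PySem.List.sorted r (fun x => x) true).Perm r :=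
    PySem.List.sorted_perm r (fun x => x) true
  rw [solution_eq_filter_max, scan_eq _ (PySem.List.sorted_pairwise_rev r (fun x => x))]
  apply foldl_max_eq_of_mem_iff
  intro x
  simp only [List.mem_filter, hperm.mem_iff, hperm.count_eq]
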